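-- pv_equiv track=rewrite | github.com/high-cuisine/backend-python | archive/replace_ingredients.py | find_similar_ingredient_name
-- ===== SOURCE A (Python) =====
-- def find_similar_ingredient_name(target_name, db_ingredients):
--     """Находит наиболее похожее имя ингредиента в БД"""
--     target_lower = target_name.lower()
--
--     # Точное совпадение
--     for db_name in db_ingredients:
--         if db_name.lower() == target_lower:
--             return db_name
--
--     # Частичное совпадение
--     for db_name in db_ingredients:
--         if target_lower in db_name.lower() or db_name.lower() in target_lower:
--             return db_name
--
--     return None
-- ===== SOURCE B (Python) =====
-- def find_similar_ingredient_name(target_name, db_ingredients):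
--     """Single pass: return an exact match immediately, remember the first partial match."""
--     target_lower = target_name.lower()
--     first_partial = None
--     for db_name in db_ingredients:
--         db_lower = db_name.lower()
--         if db_lower == target_lower:
--             return db_name
--         if first_partial is None and (target_lower in db_lower or db_lower in target_lower):
--             first_partial = db_name
--     return first_partial
-- ===== Notes on version B (the rewrite author's own statement) =====
-- stated objective: alternative
-- what changed: B replaces A's two sequential scans with a single pass that lowercases each name once, returns exact matches immediately and remembers the first partial match in an accumulator.
import Mathlib
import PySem

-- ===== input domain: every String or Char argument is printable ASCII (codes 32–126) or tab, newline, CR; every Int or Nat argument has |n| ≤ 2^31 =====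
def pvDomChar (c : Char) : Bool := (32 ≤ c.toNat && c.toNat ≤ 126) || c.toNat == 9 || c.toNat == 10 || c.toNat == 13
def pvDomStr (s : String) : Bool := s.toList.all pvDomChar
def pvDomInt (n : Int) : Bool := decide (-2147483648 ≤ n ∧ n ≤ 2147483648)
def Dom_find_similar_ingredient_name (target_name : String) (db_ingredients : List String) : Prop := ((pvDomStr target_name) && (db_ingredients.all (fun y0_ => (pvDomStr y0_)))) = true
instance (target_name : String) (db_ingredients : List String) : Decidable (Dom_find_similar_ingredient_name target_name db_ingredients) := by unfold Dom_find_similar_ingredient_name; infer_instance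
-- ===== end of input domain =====

-- B merges A's two scans into one pass with a first-partial accumulator (alternative decomposition, same cost).
-- ===== PORT A =====
def find_similar_ingredient_name (target_name : String) (db_ingredients : List String) : Option String :=
  let target_lower := PySem.Str.lower target_name
  -- first loop: exact match, early return
  match db_ingredients.find? (fun db_name => PySem.Str.lower db_name == target_lower) with
  | some db_name => some db_name
  | none =>
    -- second loop: partial match, early return
    match db_ingredients.find? (fun db_name =>
        PySem.Str.isIn target_lower (PySem.Str.lower db_name) ||
        PySem.Str.isIn (PySem.Str.lower db_name) target_lower) with
    | some db_name => some db_name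
    | none => none

-- ===== PORT B =====
-- the single loop of Source B, carrying the first_partial accumulator
def pvAltLoop (target_lower : String) (first_partial : Option String) : List String → Option String
  | [] => first_partial
  | db_name :: rest =>
    let db_lower := PySem.Str.lower db_name
    if db_lower == target_lower then some db_name
    else if first_partial.isNone &&
        (PySem.Str.isIn target_lower db_lower || PySem.Str.isIn db_lower target_lower) then
      pvAltLoop target_lower (some db_name) rest
    else
      pvAltLoop target_lower first_partial rest

def find_similar_ingredient_name_alt (target_name : String) (db_ingredients : List String) : Option String :=
  pvAltLoop (PySem.Str.lower target_name) none db_ingredients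

-- ===== PRECONDITION & SPEC =====
def Spec_find_similar_ingredient_name (target_name : String) (db_ingredients : List String) (out : Option String) : Prop := out = find_similar_ingredient_name_alt target_name db_ingredients
instance (target_name : String) (db_ingredients : List String) (out : Option String) : Decidable (Spec_find_similar_ingredient_name target_name db_ingredients out) := by unfold Spec_find_similar_ingredient_name; infer_instance

-- ===== CLAIM (what is proved, stated in full; the proofs are below) =====
def Claim_equal_find_similar_ingredient_name : Prop := ∀ (target_name : String) (db_ingredients : List String), Dom_find_similar_ingredient_name target_name db_ingredients → Spec_find_similar_ingredient_name target_name db_ingredients (find_similar_ingredient_name target_name db_ingredients)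

-- ===== LEMMAS AND PROOFS =====

-- ===== VERDICT (by name: the statement is the Claim_ definition above) =====
-- loop invariant: pvAltLoop with accumulator acc equals "first exact match, else acc, else first partial"
theorem pvAltLoop_eq (tl : String) (acc : Option String) (db : List String) :
    pvAltLoop tl acc db =
      match db.find? (fun n => PySem.Str.lower n == tl) with
      | some n => some n
      | none =>
        match acc with
        | some a => some a
        | none =>
          match db.find? (fun n =>
              PySem.Str.isIn tl (PySem.Str.lower n) ||
              PySem.Str.isIn (PySem.Str.lower n) tl) with
          | some n => some n
          | none => none := by
  induction db generalizing acc with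
  | nil => cases acc <;> simp [pvAltLoop]
  | cons n rest ih =>
    simp only [pvAltLoop, List.find?]
    cases he : (PySem.Str.lower n == tl) with
    | true => simp
    | false =>
      cases hp : (PySem.Str.isIn tl (PySem.Str.lower n) || PySem.Str.isIn (PySem.Str.lower n) tl) with
      | true =>
        cases acc with
        | none =>
          simp only [Bool.false_eq_true, if_false, Option.isNone_none, Bool.true_and, if_true, ih]
        | some a =>
          simp only [Bool.false_eq_true, if_false, Option.isNone_some, Bool.false_and, ih]
      | false =>
        cases acc <;> simp only [Bool.false_eq_true, if_false, Option.isNone_none,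
            Option.isNone_some, Bool.and_false, ih]

theorem find_similar_ingredient_name_spec : Claim_equal_find_similar_ingredient_name := by
  intro target_name db_ingredients _
  unfold Spec_find_similar_ingredient_name find_similar_ingredient_name find_similar_ingredient_name_alt
  rw [pvAltLoop_eq]
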